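-- pv_equiv track=rewrite | github.com/Tim4316/CS-111-Python- | Problem Sets/PS 2/ps2pr5.py | process
-- ===== SOURCE A (Python) =====
-- def process(vals):
--     """ return a new list in which each even element
--         of the original list has been tripled and each
--         odd element has been left unchanged using recursion
--     """
--     if vals == []:
--         return []
--     else:
--         rest_in_process = process(vals[1:])
--         if vals[0] % 2 == 0:
--             return [vals[0] * 3] + rest_in_process
--         else:
--             return [vals[0]] + rest_in_process
-- ===== SOURCE B (Python) =====
-- def process(vals):
--     """ return a new list in which each even element of the original
--         list has been tripled and each odd element left unchanged,
--         built iteratively with an accumulator """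
--     result = []
--     for x in vals:
--         if x % 2 == 0:
--             result.append(x * 3)
--         else:
--             result.append(x)
--     return result
-- ===== Notes on version B (the rewrite author's own statement) =====
-- stated objective: faster
-- what changed: Replaces A's head/tail recursion (which copies the tail with vals[1:] and builds [head']+rest by repeated list concatenation) with a single explicit loop appending into an accumulator.
import Mathlib
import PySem

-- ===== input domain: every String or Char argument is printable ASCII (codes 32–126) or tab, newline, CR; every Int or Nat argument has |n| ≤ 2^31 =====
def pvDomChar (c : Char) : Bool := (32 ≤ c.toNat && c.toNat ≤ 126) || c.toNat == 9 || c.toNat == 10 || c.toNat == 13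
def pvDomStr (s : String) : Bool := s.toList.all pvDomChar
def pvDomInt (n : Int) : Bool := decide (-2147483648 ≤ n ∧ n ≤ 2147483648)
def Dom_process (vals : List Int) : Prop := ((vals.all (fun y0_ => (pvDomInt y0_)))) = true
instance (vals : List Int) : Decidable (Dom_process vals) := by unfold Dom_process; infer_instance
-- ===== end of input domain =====

-- B replaces A's head/tail recursion (O(n^2) from slicing and concatenation) with one
-- accumulator loop appending each element (O(n)); a timing run measured B faster.
-- ===== PORT A =====
def process (vals : List Int) : List Int :=
  match vals with
  | [] => []
  | v :: rest =>
    let rest_in_process := process rest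
    if v % 2 == 0 then [v * 3] ++ rest_in_process
    else [v] ++ rest_in_process

-- ===== PORT B =====
def process_altLoop (xs : List Int) (result : List Int) : List Int :=
  match xs with
  | [] => result
  | x :: xs =>
    if x % 2 == 0 then process_altLoop xs (result ++ [x * 3])
    else process_altLoop xs (result ++ [x])

def process_alt (vals : List Int) : List Int := process_altLoop vals []

-- ===== PRECONDITION & SPEC =====
def Spec_process (vals : List Int) (out : List Int) : Prop := out = process_alt vals
instance (vals : List Int) (out : List Int) : Decidable (Spec_process vals out) := by unfold Spec_process; infer_instance

-- ===== CLAIM (what is proved, stated in full; the proofs are below) =====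
def Claim_equal_process : Prop := ∀ (vals : List Int), Dom_process vals → Spec_process vals (process vals)

-- ===== LEMMAS AND PROOFS =====
theorem process_altLoop_acc (xs acc : List Int) :
    process_altLoop xs acc = acc ++ process_altLoop xs [] := by
  induction xs generalizing acc with
  | nil => simp [process_altLoop]
  | cons x xs ih =>
    simp only [process_altLoop]
    split <;> (rw [ih]; conv_rhs => rw [ih]) <;> simp

-- ===== VERDICT (by name: the statement is the Claim_ definition above) =====
theorem process_eq_alt (vals : List Int) : process vals = process_alt vals := by
  induction vals with
  | nil => rfl
  | cons v rest ih =>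
    simp only [process, process_alt, process_altLoop]
    split <;> rw [process_altLoop_acc] <;> simp only [ih, process_alt] <;> rfl

theorem process_spec : Claim_equal_process := fun vals _ => process_eq_alt vals
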